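-- pv_equiv track=rewrite | github.com/Julianmarania/monthly-sales-analyzer-project-2025 | monthly_sales_analyzer.py | top_product
-- ===== SOURCE A (Python) =====
-- def top_product(data):
--     """Determines which product had the highest total sales in 30 days."""
--     total_a = 0
--     total_b = 0
--     total_c = 0
--
--     for i in data:
--         total_a += i['product_a']
--
--     for i in data:
--         total_b += i['product_b']
--
--     for i in data:
--         total_c += i['product_c']
--
--     highest_sales = max(total_a, total_b, total_c)
--
--     if highest_sales == total_a:
--         return "product_a"
--     elif highest_sales == total_b:
--         return "product_b"
--     else:
--         return "product_c"
-- ===== SOURCE B (Python) =====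
-- def top_product(data):
--     """Determines which product had the highest total sales in 30 days."""
--     # Single pass maintaining pairwise difference accumulators; the winner is
--     # decided by sign tests (a tournament), never by computing the totals.
--     d_ab = d_ac = d_bc = 0
--     for row in data:
--         a, b, c = row['product_a'], row['product_b'], row['product_c']
--         d_ab += a - b
--         d_ac += a - c
--         d_bc += b - c
--     if d_ab >= 0 and d_ac >= 0:
--         return "product_a"
--     if d_bc >= 0:
--         return "product_b"
--     return "product_c"
-- ===== Notes on version B (the rewrite author's own statement) =====
-- stated objective: alternative
-- what changed: Replaced three total-sum loops plus max and an if-elif cascade by a single pass maintaining three pairwise difference accumulators (a-b, a-c, b-c) and deciding the winner by sign tests, so neither the totals nor max are ever computed; ties break to a over b over c exactly as in A.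
import Mathlib
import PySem

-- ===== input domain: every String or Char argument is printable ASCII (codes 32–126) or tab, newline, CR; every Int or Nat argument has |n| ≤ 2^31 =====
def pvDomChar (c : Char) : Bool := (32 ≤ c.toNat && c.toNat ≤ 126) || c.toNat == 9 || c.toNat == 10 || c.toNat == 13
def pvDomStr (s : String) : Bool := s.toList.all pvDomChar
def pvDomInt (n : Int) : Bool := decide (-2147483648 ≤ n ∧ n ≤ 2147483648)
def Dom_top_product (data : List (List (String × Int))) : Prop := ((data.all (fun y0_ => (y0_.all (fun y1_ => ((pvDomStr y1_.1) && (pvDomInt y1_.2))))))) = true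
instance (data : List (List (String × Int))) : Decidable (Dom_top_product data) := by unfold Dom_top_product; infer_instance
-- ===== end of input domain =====

-- B replaces A's three total-sum loops plus max/if-elif by one pass over
-- pairwise difference accumulators decided by sign tests (same O(n) cost).

-- ===== PORT A =====
def top_product (data : List (List (String × Int))) : String :=
  let total_a := data.foldl (fun acc i => acc + (PySem.Dict.mk i).getD "product_a" 0) 0
  let total_b := data.foldl (fun acc i => acc + (PySem.Dict.mk i).getD "product_b" 0) 0
  let total_c := data.foldl (fun acc i => acc + (PySem.Dict.mk i).getD "product_c" 0) 0
  let highest_sales := max total_a (max total_b total_c)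
  if highest_sales = total_a then "product_a"
  else if highest_sales = total_b then "product_b"
  else "product_c"

-- ===== PORT B =====
-- one step of B's loop over the three pairwise difference accumulators
def diffStep (s : Int × Int × Int) (row : List (String × Int)) : Int × Int × Int :=
  let a := (PySem.Dict.mk row).getD "product_a" 0
  let b := (PySem.Dict.mk row).getD "product_b" 0
  let c := (PySem.Dict.mk row).getD "product_c" 0
  (s.1 + (a - b), s.2.1 + (a - c), s.2.2 + (b - c))

def top_product_alt (data : List (List (String × Int))) : String :=
  let d := data.foldl diffStep (0, 0, 0)
  if 0 ≤ d.1 ∧ 0 ≤ d.2.1 then "product_a"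
  else if 0 ≤ d.2.2 then "product_b"
  else "product_c"

-- ===== PRECONDITION & SPEC =====
-- Pre_ excludes rows missing one of the three product keys, on which the Python A raises KeyError.
def Pre_top_product (data : List (List (String × Int))) : Prop :=
  ∀ i ∈ data, (PySem.Dict.mk i).contains "product_a" = true ∧
              (PySem.Dict.mk i).contains "product_b" = true ∧
              (PySem.Dict.mk i).contains "product_c" = true
instance (data : List (List (String × Int))) : Decidable (Pre_top_product data) := by unfold Pre_top_product; infer_instance

def pvWitness_top_product : (List (List (String × Int))) :=
  [[("product_a", 1), ("product_b", 2), ("product_c", 3)]]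

def Spec_top_product (data : List (List (String × Int))) (out : String) : Prop := out = top_product_alt data
instance (data : List (List (String × Int))) (out : String) : Decidable (Spec_top_product data out) := by unfold Spec_top_product; infer_instance

-- ===== CLAIM (what is proved, stated in full; the proofs are below) =====
def Claim_equal_top_product : Prop := ∀ (data : List (List (String × Int))), Dom_top_product data → Pre_top_product data → Spec_top_product data (top_product data)

-- ===== LEMMAS AND PROOFS =====

-- the key function of a row
def rowKey (k : String) (row : List (String × Int)) : Int := (PySem.Dict.mk row).getD k 0

-- shifting the accumulator out of a sum fold
theorem sumShift (l : List (List (String × Int))) (k : String) (a : Int) :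
    l.foldl (fun acc i => acc + rowKey k i) a
      = a + l.foldl (fun acc i => acc + rowKey k i) 0 := by
  induction l generalizing a with
  | nil => simp
  | cons r t iht => simp only [List.foldl]; rw [iht, iht (0 + rowKey k r)]; ring

-- B's difference fold computes exactly the pairwise differences of A's totals
theorem diffFold_eq (data : List (List (String × Int))) :
    ∀ x y z : Int, data.foldl diffStep (x, y, z) =
      (x + (data.foldl (fun acc i => acc + rowKey "product_a" i) 0
            - data.foldl (fun acc i => acc + rowKey "product_b" i) 0),
       y + (data.foldl (fun acc i => acc + rowKey "product_a" i) 0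
            - data.foldl (fun acc i => acc + rowKey "product_c" i) 0),
       z + (data.foldl (fun acc i => acc + rowKey "product_b" i) 0
            - data.foldl (fun acc i => acc + rowKey "product_c" i) 0)) := by
  induction data with
  | nil => intro x y z; simp
  | cons row rest ih =>
    intro x y z
    simp only [List.foldl, diffStep]
    rw [ih, sumShift rest "product_a" (0 + rowKey "product_a" row), sumShift rest "product_b" (0 + rowKey "product_b" row), sumShift rest "product_c" (0 + rowKey "product_c" row)]
    simp only [Prod.mk.injEq, rowKey]
    refine ⟨by ring, by ring, by ring⟩

-- ===== VERDICT (by name: the statement is the Claim_ definition above) =====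
theorem top_product_spec : Claim_equal_top_product := by
  intro data _ _
  unfold Spec_top_product top_product top_product_alt
  have h := diffFold_eq data 0 0 0
  simp only [rowKey] at h
  rw [h]
  simp only []
  set A := data.foldl (fun acc i => acc + (PySem.Dict.mk i).getD "product_a" 0) 0 with hA
  set B := data.foldl (fun acc i => acc + (PySem.Dict.mk i).getD "product_b" 0) 0 with hB
  set C := data.foldl (fun acc i => acc + (PySem.Dict.mk i).getD "product_c" 0) 0 with hC
  split_ifs <;> first | rfl | (exfalso; omega)
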